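-- pv_equiv track=rewrite | github.com/pedrogillet1/koda-webapp | backend/clean-console-logs.py | clean_console_logs
-- ===== SOURCE A (Python) =====
-- def clean_console_logs(content):
--     """Remove console.log and console.warn, keep console.error"""
--     lines = content.split('\n')
--     result = []
--     skip_until_semicolon = False
--     paren_count = 0
--
--     for line in lines:
--         # Check if line starts with console.log or console.warn
--         stripped = line.lstrip()
--
--         if skip_until_semicolon:
--             # Count parentheses to know when statement ends
--             paren_count += line.count('(') - line.count(')')
--
--             # Check if line ends the statement
--             if ');' in line and paren_count <= 0:
--                 skip_until_semicolon = False
--                 paren_count = 0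
--             continue
--
--         if stripped.startswith('console.log(') or stripped.startswith('console.warn('):
--             # Count parentheses in this line
--             paren_count = line.count('(') - line.count(')')
--
--             # If statement doesn't end on this line, skip until it does
--             if ');' not in line or paren_count > 0:
--                 skip_until_semicolon = True
--             # Otherwise just skip this line
--             continue
--
--         result.append(line)
--
--     return '\n'.join(result)
-- ===== SOURCE B (Python) =====
-- def clean_console_logs(content):
--     """Remove console.log and console.warn, keep console.error"""
--     lines = content.split('\n')
--     result = []
--     i = 0
--     n = len(lines)
--     while i < n:
--         line = lines[i]
--         stripped = line.lstrip()
--         if stripped.startswith('console.log(') or stripped.startswith('console.warn('):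
--             paren_count = line.count('(') - line.count(')')
--             i += 1
--             if ');' not in line or paren_count > 0:
--                 # consume the rest of the multi-line statement
--                 while i < n:
--                     cur = lines[i]
--                     paren_count += cur.count('(') - cur.count(')')
--                     i += 1
--                     if ');' in cur and paren_count <= 0:
--                         break
--         else:
--             result.append(line)
--             i += 1
--     return '\n'.join(result)
-- ===== Notes on version B (the rewrite author's own statement) =====
-- stated objective: alternative
-- what changed: Replaces the flag-based single pass (skip_until_semicolon state threaded through one for-loop) with an index-based while loop that, on a multi-line console statement, consumes the whole block in a dedicated inner while loop, so no skip flag or cross-iteration paren state exists.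
import Mathlib
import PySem

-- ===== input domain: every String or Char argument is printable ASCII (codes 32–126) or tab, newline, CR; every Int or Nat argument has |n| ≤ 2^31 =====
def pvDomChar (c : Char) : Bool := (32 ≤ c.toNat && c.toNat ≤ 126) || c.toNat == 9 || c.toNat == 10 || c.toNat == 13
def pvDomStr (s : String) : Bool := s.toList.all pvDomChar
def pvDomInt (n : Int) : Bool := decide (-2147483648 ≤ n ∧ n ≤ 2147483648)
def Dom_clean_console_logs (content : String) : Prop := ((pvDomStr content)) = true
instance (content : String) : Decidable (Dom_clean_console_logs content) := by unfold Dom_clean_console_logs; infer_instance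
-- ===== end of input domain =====

-- B replaces A's flag-based single pass with an index/while loop that consumes a
-- multi-line console statement in an inner loop (alternative decomposition, same cost).

-- ===== PORT A =====

-- line.count('(') - line.count(')')
def cclDelta (line : String) : Int :=
  (PySem.Str.count line "(" : Int) - (PySem.Str.count line ")" : Int)

-- whether the stripped line starts a console.log/console.warn statement
def cclStarts (line : String) : Bool :=
  PySem.Str.startswith (PySem.Str.lstrip line) "console.log(" ||
  PySem.Str.startswith (PySem.Str.lstrip line) "console.warn("

-- one iteration of A's for-loop over state (result, skip_until_semicolon, paren_count)
def cclAStep (st : List String × Bool × Int) (line : String) : List String × Bool × Int :=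
  let result := st.1
  let skip := st.2.1
  let pc := st.2.2
  if skip then
    let pc' := pc + cclDelta line
    if PySem.Str.isIn ");" line && decide (pc' ≤ 0) then (result, false, 0)
    else (result, true, pc')
  else if cclStarts line then
    let pc0 := cclDelta line
    if !PySem.Str.isIn ");" line || decide (pc0 > 0) then (result, true, pc0)
    else (result, false, pc0)
  else (result ++ [line], skip, pc)

def clean_console_logs (content : String) : String :=
  let lines := (PySem.Str.split? content "\n").getD []
  PySem.Str.join "\n" ((lines.foldl cclAStep ([], false, 0)).1)

-- ===== PORT B =====

-- inner while: consume lines until one has ');' and the running count ≤ 0; returns the rest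
def cclBSkip : Int → List String → List String
  | _, [] => []
  | pc, cur :: rest =>
    let pc' := pc + cclDelta cur
    if PySem.Str.isIn ");" cur && decide (pc' ≤ 0) then rest
    else cclBSkip pc' rest

theorem cclBSkip_length_le (pc : Int) (ls : List String) :
    (cclBSkip pc ls).length ≤ ls.length := by
  induction ls generalizing pc with
  | nil => simp [cclBSkip]
  | cons cur rest ih =>
    simp only [cclBSkip]
    split
    · simp
    · exact Nat.le_succ_of_le (ih _)

-- outer while over the line index, as structural recursion on the remaining lines
def cclBGo : List String → List String
  | [] => []
  | line :: rest =>
    if cclStarts line then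
      let pc := cclDelta line
      if !PySem.Str.isIn ");" line || decide (pc > 0) then
        cclBGo (cclBSkip pc rest)
      else
        cclBGo rest
    else
      line :: cclBGo rest
termination_by ls => ls.length
decreasing_by
  · exact Nat.lt_succ_of_le (cclBSkip_length_le _ _)
  · simp
  · simp

def clean_console_logs_alt (content : String) : String :=
  PySem.Str.join "\n" (cclBGo ((PySem.Str.split? content "\n").getD []))

-- ===== PRECONDITION & SPEC =====
def Spec_clean_console_logs (content : String) (out : String) : Prop := out = clean_console_logs_alt content
instance (content : String) (out : String) : Decidable (Spec_clean_console_logs content out) := by unfold Spec_clean_console_logs; infer_instance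

-- ===== CLAIM (what is proved, stated in full; the proofs are below) =====
def Claim_equal_clean_console_logs : Prop := ∀ (content : String), Dom_clean_console_logs content → Spec_clean_console_logs content (clean_console_logs content)

-- ===== LEMMAS AND PROOFS =====

-- A's fold in skip mode drops lines exactly until B's inner loop would stop
theorem foldA_skip (ls : List String) (res : List String) (pc : Int) :
    (ls.foldl cclAStep (res, true, pc)).1
      = ((cclBSkip pc ls).foldl cclAStep (res, false, 0)).1 := by
  induction ls generalizing pc with
  | nil => simp [cclBSkip]
  | cons cur rest ih =>
    simp only [List.foldl_cons, cclBSkip, cclAStep]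
    by_cases h : (PySem.Str.isIn ");" cur && decide (pc + cclDelta cur ≤ 0)) = true
    · rw [if_pos h, if_pos h]; simp
    · rw [if_neg h, if_neg h]
      exact ih _

-- A's fold out of skip mode computes res ++ (B's outer loop)
theorem foldA_eq_go (ls : List String) (res : List String) (pc : Int) :
    (ls.foldl cclAStep (res, false, pc)).1 = res ++ cclBGo ls := by
  induction hn : ls.length using Nat.strong_induction_on generalizing ls res pc with
  | _ n ih =>
    match ls with
    | [] => simp [cclBGo]
    | line :: rest =>
      subst hn
      simp only [List.foldl_cons, cclBGo]
      by_cases hs : cclStarts line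
      · by_cases hm : (!PySem.Str.isIn ");" line || decide (cclDelta line > 0)) = true
        · simp only [cclAStep, hs, hm, if_pos, Bool.false_eq_true, if_false]
          rw [foldA_skip]
          exact ih _ (Nat.lt_succ_of_le (cclBSkip_length_le _ _)) _ _ _ rfl
        · simp only [cclAStep, hs, hm, if_pos, Bool.false_eq_true, if_false]
          exact ih _ (Nat.lt_succ_self _) _ _ _ rfl
      · simp only [cclAStep, hs, Bool.false_eq_true, if_false]
        rw [ih rest.length (Nat.lt_succ_self _) _ _ _ rfl]
        simp

-- ===== VERDICT (by name: the statement is the Claim_ definition above) =====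
theorem clean_console_logs_spec : Claim_equal_clean_console_logs := by
  intro content _
  show clean_console_logs content = clean_console_logs_alt content
  unfold clean_console_logs clean_console_logs_alt
  simp only [foldA_eq_go, List.nil_append]
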